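-- pv_equiv track=rewrite | github.com/edonnardkibii/calibration-and-optimization | ground_detection/mirror_mode.py | distribute_values
-- ===== SOURCE A (Python) =====
-- def distribute_values(distances, angles, start_angle, end_angle):
--     target_angles = []
--     target_distances = []
--
--     for i in range(len(angles)):
--         if start_angle <= angles[i] <= end_angle:
--             target_angles.append(angles[i])
--
--     temp = set(target_angles)
--     index_list = [i for i, val in enumerate(angles) if val in temp]
--
--     for i in range(len(index_list)):
--         target_distances.append(distances[index_list[i]])
--
--     return target_distances, target_angles
-- ===== SOURCE B (Python) =====
-- def distribute_values(distances, angles, start_angle, end_angle):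
--     target_angles = []
--     target_distances = []
--     for i in range(len(angles)):
--         if start_angle <= angles[i] <= end_angle:
--             target_angles.append(angles[i])
--             target_distances.append(distances[i])
--     return target_distances, target_angles
-- ===== Notes on version B (the rewrite author's own statement) =====
-- stated objective: simpler
-- what changed: B replaces A's three passes (collect in-range angles, build a set and rescan angles for matching indices, then index distances) with one indexed pass appending both the angle and its distance, eliminating the set and index_list entirely.
import Mathlib
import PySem

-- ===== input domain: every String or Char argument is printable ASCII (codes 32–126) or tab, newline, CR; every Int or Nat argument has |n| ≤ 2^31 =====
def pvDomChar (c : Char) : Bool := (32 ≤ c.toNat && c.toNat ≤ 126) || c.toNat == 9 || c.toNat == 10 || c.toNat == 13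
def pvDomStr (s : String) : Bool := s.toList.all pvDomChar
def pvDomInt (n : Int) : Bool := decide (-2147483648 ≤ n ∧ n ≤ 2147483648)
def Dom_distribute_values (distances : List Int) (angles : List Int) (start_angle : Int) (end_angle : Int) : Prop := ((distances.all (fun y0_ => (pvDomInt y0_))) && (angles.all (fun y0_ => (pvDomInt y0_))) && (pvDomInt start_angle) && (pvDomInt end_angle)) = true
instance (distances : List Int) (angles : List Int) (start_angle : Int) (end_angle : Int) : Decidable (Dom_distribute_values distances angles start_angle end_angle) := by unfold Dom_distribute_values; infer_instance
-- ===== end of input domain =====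

-- B: one indexed pass appends each in-range angle and its distance, replacing A's
-- three passes (angle filter, set + index rescan, distance gather); same output.


-- ===== PORT A =====
-- literal transliteration of A; pyGetD is exact under Pre_ (indices are in range there)
def distribute_values (distances : List Int) (angles : List Int) (start_angle : Int) (end_angle : Int) : List Int × List Int :=
  let target_angles : List Int :=
    (PySem.List.pyRange 0 (angles.length : Int) 1).foldl (fun acc i =>
      let v := PySem.List.pyGetD angles i 0
      if start_angle ≤ v ∧ v ≤ end_angle then acc ++ [v] else acc) []
  let temp : PySem.Set Int := PySem.Set.ofList target_angles
  let index_list : List Int :=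
    (PySem.List.enumerate angles 0).foldl (fun acc p =>
      if PySem.Set.contains temp p.2 then acc ++ [p.1] else acc) []
  let target_distances : List Int :=
    (PySem.List.pyRange 0 (index_list.length : Int) 1).foldl (fun acc i =>
      acc ++ [PySem.List.pyGetD distances (PySem.List.pyGetD index_list i 0) 0]) []
  (target_distances, target_angles)

-- ===== PORT B =====
-- literal transliteration of B: one indexed pass with a pair accumulator
def distribute_values_alt (distances : List Int) (angles : List Int) (start_angle : Int) (end_angle : Int) : List Int × List Int :=
  let p :=
    (PySem.List.pyRange 0 (angles.length : Int) 1).foldl (fun (acc : List Int × List Int) i =>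
      let v := PySem.List.pyGetD angles i 0
      if start_angle ≤ v ∧ v ≤ end_angle then
        (acc.1 ++ [PySem.List.pyGetD distances i 0], acc.2 ++ [v])
      else acc) ([], [])
  (p.1, p.2)

-- ===== PRECONDITION & SPEC =====
-- Pre_ excludes exactly the inputs where Python A raises IndexError:
-- some in-range angle sits at an index past the end of distances.
def Pre_distribute_values (distances : List Int) (angles : List Int) (start_angle : Int) (end_angle : Int) : Prop :=
  ∀ i ∈ List.range angles.length,
    (start_angle ≤ angles.getD i 0 ∧ angles.getD i 0 ≤ end_angle) → i < distances.length
instance (distances : List Int) (angles : List Int) (start_angle : Int) (end_angle : Int) : Decidable (Pre_distribute_values distances angles start_angle end_angle) := by unfold Pre_distribute_values; infer_instance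
def pvWitness_distribute_values : List Int × List Int × Int × Int := ([5, 7, 9], [10, 20, 30], 15, 25)
def Spec_distribute_values (distances : List Int) (angles : List Int) (start_angle : Int) (end_angle : Int) (out : List Int × List Int) : Prop := out = distribute_values_alt distances angles start_angle end_angle
instance (distances : List Int) (angles : List Int) (start_angle : Int) (end_angle : Int) (out : List Int × List Int) : Decidable (Spec_distribute_values distances angles start_angle end_angle out) := by unfold Spec_distribute_values; infer_instance

-- ===== CLAIM (what is proved, stated in full; the proofs are below) =====
def Claim_equal_distribute_values : Prop := ∀ (distances : List Int) (angles : List Int) (start_angle : Int) (end_angle : Int), Dom_distribute_values distances angles start_angle end_angle → Pre_distribute_values distances angles start_angle end_angle → Spec_distribute_values distances angles start_angle end_angle (distribute_values distances angles start_angle end_angle)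

-- ===== LEMMAS AND PROOFS =====

-- B's pair-accumulator loop over any list of (index, value) pairs, characterised.
theorem pv_b_fold (g : Int → Int) (P : Int × Int → Bool) (e : List (Int × Int))
    (l1 l2 : List Int) :
    e.foldl (fun (acc : List Int × List Int) p =>
        if P p then (acc.1 ++ [g p.1], acc.2 ++ [p.2]) else acc) (l1, l2)
      = (l1 ++ (e.filter P).map (fun p => g p.1), l2 ++ (e.filter P).map (·.2)) := by
  induction e generalizing l1 l2 with
  | nil => simp
  | cons x xs ih =>
    by_cases h : P x <;> simp [List.foldl_cons, h, ih]

theorem distribute_values_eq (distances angles : List Int) (s e : Int) :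
    distribute_values distances angles s e = distribute_values_alt distances angles s e := by
  unfold distribute_values distribute_values_alt
  simp only []
  -- rewrite A's first loop to a filter
  rw [PySem.List.foldl_pyRange_zero_pyGetD' angles 0
        (fun acc v => if s ≤ v ∧ v ≤ e then acc ++ [v] else acc) []]
  rw [PySem.List.foldl_append_ite (fun v => s ≤ v ∧ v ≤ e) (fun v => v) angles []]
  -- rewrite B's loop through enumerate
  have hB := pv_b_fold (fun j => PySem.List.pyGetD distances j 0)
      (fun p => decide (s ≤ p.2 ∧ p.2 ≤ e)) (PySem.List.enumerate angles 0) [] []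
  rw [PySem.List.enumerate_eq_map_pyRange angles 0, List.foldl_map] at hB
  simp only [List.nil_append, PySem.List.len_eq] at hB
  rw [show (fun (acc : List Int × List Int) (i : Int) =>
        let v := PySem.List.pyGetD angles i 0
        if s ≤ v ∧ v ≤ e then (acc.1 ++ [PySem.List.pyGetD distances i 0], acc.2 ++ [v]) else acc)
      = (fun (acc : List Int × List Int) (i : Int) =>
        if decide (s ≤ PySem.List.pyGetD angles i 0 ∧ PySem.List.pyGetD angles i 0 ≤ e) = true
        then (acc.1 ++ [PySem.List.pyGetD distances i 0],
              acc.2 ++ [PySem.List.pyGetD angles i 0]) else acc)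
    from by funext acc i; simp]
  rw [hB]
  simp only [List.nil_append, List.map_id']
  -- now the A side: index_list loop and distance loop
  set F : List Int := angles.filter (fun v => decide (s ≤ v ∧ v ≤ e)) with hF
  set E : List (Int × Int) := PySem.List.enumerate angles 0 with hE
  set EF : List (Int × Int) := E.filter (fun p => decide (s ≤ p.2 ∧ p.2 ≤ e)) with hEF
  -- second component equality: map snd of filtered enumerate = filter of angles
  have hsnd : EF.map (·.2) = F := by
    rw [hEF, hE, hF]
    conv_rhs => rw [← PySem.List.map_snd_enumerate angles 0]
    rw [List.filter_map]
    rfl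
  -- index_list loop: rewrite the set-membership test to the range test
  have hidx : E.foldl (fun acc p => if PySem.Set.contains (PySem.Set.ofList F) p.2
        then acc ++ [p.1] else acc) [] = EF.map (·.1) := by
    rw [PySem.List.foldl_append_if (fun p => PySem.Set.contains (PySem.Set.ofList F) p.2)
          (fun p : Int × Int => p.1) E []]
    rw [List.nil_append, hEF]
    congr 1
    apply List.filter_congr
    intro p hp
    have hv : p.2 ∈ angles := by
      have := PySem.List.map_snd_enumerate angles 0
      rw [hE] at hp
      exact this ▸ List.mem_map_of_mem hp
    have : PySem.Set.contains (PySem.Set.ofList F) p.2 = (p.2 ∈ F : Bool) := by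
      simp [PySem.Set.contains, PySem.Set.mem_ofList]
    rw [this, hF]
    simp [List.mem_filter, hv]
  rw [hidx]
  -- distance loop: indexing into distances along EF.map fst
  rw [PySem.List.foldl_pyRange_zero_pyGetD' (EF.map (·.1)) 0
        (fun acc j => acc ++ [PySem.List.pyGetD distances j 0]) []]
  rw [PySem.List.foldl_append_singleton_eq_map (f := fun j => PySem.List.pyGetD distances j 0)]
  rw [List.map_map]
  have hEN : PySem.List.enumerate angles = (PySem.List.pyRange 0 (angles.length : Int) 1).map
      (fun j => (j, PySem.List.pyGetD angles j 0)) := by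
    rw [PySem.List.enumerate_eq_map_pyRange angles 0]; simp [PySem.List.len_eq]
  rw [← hEN, ← hE, ← hEF, hsnd]
  simp [Function.comp]

-- ===== VERDICT (by name: the statement is the Claim_ definition above) =====
theorem distribute_values_spec : Claim_equal_distribute_values := by
  intro distances angles s e _ _
  unfold Spec_distribute_values
  exact distribute_values_eq distances angles s e
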